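-- pv_equiv track=rewrite | github.com/sugyun/DCGS | PyBoolNet/StateTransitionGraphs.py | find_vanham_variables
-- ===== SOURCE A (Python) =====
-- VAN_HAM_EXTENSIONS = {3: ["_medium", "_high"],
--                       4: ["_level1", "_level2", "_level3"],
--                       5: ["_level1", "_level2", "_level3", "_level4"]}
--
-- def find_vanham_variables(Primes):
--     """
--     Detects variables that represent multi-valued variables using the Van Ham encoding, see :ref:`Didier2011` for more details.
--     E.g. three-valued variables x are encoded via two Boolean variables x_medium and x_high.
--     This function is used for example by :ref:`ModelChecking.primes2smv <primes2smv>` to add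
--     INIT constraints to the smv file that forbid all states that are not admissible, e.g. in which "!x_medium & x_high" is true.
--
--     **arguments**:
--         * *Primes*: prime implicants
--
--     **returns**:
--         * *Names* (dict): activity levels and names
--
--     **example**::
--
--         >>> find_vanham_variables(primes)
--         {2: ['E2F1', 'ATM'],
--          3: ['ERK'],
--          4: [],
--          5: []}
--     """
--
--     seen_base = []
--     seen_names = []
--     vanham = {}
--
--     for val in sorted(VAN_HAM_EXTENSIONS, reverse=True):
--         post = VAN_HAM_EXTENSIONS[val][0]
--         base = [x.replace(post, "") for x in Primes if x.endswith(post)]  # possible base names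
--         base = [x for x in base if not x in seen_base]  # base already seen for larger val
--         base = [x for x in base if all(x + y in Primes for y in VAN_HAM_EXTENSIONS[val])]  # bingo
--         names = [x + y for x in base for y in VAN_HAM_EXTENSIONS[val]]
--
--         vanham[val] = sorted(base)
--         seen_base.extend(base)
--         seen_names.extend(names)
--
--     vanham[2] = sorted(x for x in Primes if not x in seen_names)
--
--     return vanham
-- ===== SOURCE B (Python) =====
-- VAN_HAM_EXTENSIONS = {3: ["_medium", "_high"],
--                       4: ["_level1", "_level2", "_level3"],
--                       5: ["_level1", "_level2", "_level3", "_level4"]}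
--
--
-- def find_vanham_variables(Primes):
--     present = set(Primes)
--     # one pass over Primes: each prime yields at most one occurrence (val, base),
--     # val being the highest level for which this prime's base has its full suffix set
--     occ = []
--     for x in Primes:
--         for val in (5, 4, 3):
--             post = VAN_HAM_EXTENSIONS[val][0]
--             if x.endswith(post):
--                 b = x.replace(post, "")
--                 if all(b + y in present for y in VAN_HAM_EXTENSIONS[val]):
--                     occ.append((val, b))
--                     break
--     # resolve each base to its maximal recorded level
--     base_max = {}
--     for val, b in occ:
--         if base_max.get(b, 0) < val:
--             base_max[b] = val
--     vanham = {val: sorted(b for v, b in occ if v == val and base_max[b] == val)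
--               for val in (5, 4, 3)}
--     names = {b + y for b, v in base_max.items() for y in VAN_HAM_EXTENSIONS[v]}
--     vanham[2] = sorted(x for x in Primes if x not in names)
--     return vanham
-- ===== Notes on version B (the rewrite author's own statement) =====
-- stated objective: alternative
-- what changed: B replaces A's level-major loop with seen_base/seen_names exclusion lists by a prime-major single pass that classifies each prime once to its highest qualifying level (break at first hit), then resolves bases by a max pass and derives the buckets and encoding names from that.
import Mathlib
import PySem

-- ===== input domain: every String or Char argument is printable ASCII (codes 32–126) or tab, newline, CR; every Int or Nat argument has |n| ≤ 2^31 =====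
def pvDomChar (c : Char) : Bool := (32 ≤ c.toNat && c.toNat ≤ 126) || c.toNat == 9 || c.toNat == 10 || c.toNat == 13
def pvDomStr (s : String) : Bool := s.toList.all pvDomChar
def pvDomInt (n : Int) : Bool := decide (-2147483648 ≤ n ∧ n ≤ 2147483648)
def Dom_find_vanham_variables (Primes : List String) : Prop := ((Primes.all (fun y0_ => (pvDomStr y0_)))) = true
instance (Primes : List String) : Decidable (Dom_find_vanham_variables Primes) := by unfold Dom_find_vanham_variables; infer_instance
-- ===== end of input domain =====

-- B traverses the PRIMES once, classifying each prime to its highest qualifying Van Ham level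
-- (break at first hit), then resolves bases by a max pass — instead of A's level-major staged
-- filters with seen_base/seen_names exclusion lists; objective: alternative decomposition.

-- ===== PORT A =====
-- module-level constant shared by both Python files
def VAN_HAM_EXTENSIONS : PySem.Dict Int (List String) :=
  PySem.Dict.ofList [(3, ["_medium", "_high"]),
                     (4, ["_level1", "_level2", "_level3"]),
                     (5, ["_level1", "_level2", "_level3", "_level4"])]

-- literal transliteration of A: state (seen_base, seen_names, vanham), loop over sorted keys descending
def find_vanham_variables (Primes : List String) : List (Int × List String) :=
  let st := (PySem.List.sorted VAN_HAM_EXTENSIONS.keys (fun k => k) true).foldl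
    (fun (st : List String × List String × PySem.Dict Int (List String)) val =>
      let seen_base := st.1
      let seen_names := st.2.1
      let vanham := st.2.2
      -- VAN_HAM_EXTENSIONS[val][0]: val is always a key, the lists are nonempty, so the defaults are never used
      let post := (PySem.List.pyGet? (VAN_HAM_EXTENSIONS.getD val []) 0).getD ""
      let base := (Primes.filter (fun x => PySem.Str.endswith x post)).map (fun x => PySem.Str.replace x post "")
      let base := base.filter (fun x => !(seen_base.contains x))
      let base := base.filter (fun x => (VAN_HAM_EXTENSIONS.getD val []).all (fun y => Primes.contains (x ++ y)))
      let names := base.flatMap (fun x => (VAN_HAM_EXTENSIONS.getD val []).map (fun y => x ++ y))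
      (seen_base ++ base, seen_names ++ names,
       vanham.insert val (PySem.List.sorted base (fun s => s) false)))
    ([], [], PySem.Dict.empty)
  (st.2.2.insert 2 (PySem.List.sorted (Primes.filter (fun x => !(st.2.1.contains x))) (fun s => s) false)).items

-- ===== PORT B =====
-- inner 'for val in (5, 4, 3): … break': first val whose post matches and whose full suffix set is present
def vhLevelOf (present : PySem.Set String) (x : String) : List Int → Option (Int × String)
  | [] => none
  | val :: rest =>
    let post := (PySem.List.pyGet? (VAN_HAM_EXTENSIONS.getD val []) 0).getD ""
    if PySem.Str.endswith x post then
      let b := PySem.Str.replace x post ""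
      if (VAN_HAM_EXTENSIONS.getD val []).all (fun y => PySem.Set.contains present (b ++ y)) then
        some (val, b)
      else vhLevelOf present x rest
    else vhLevelOf present x rest

def find_vanham_variables_alt (Primes : List String) : List (Int × List String) :=
  let present : PySem.Set String := PySem.Set.ofList Primes
  -- one pass over Primes: each prime yields at most one occurrence (val, base)
  let occ : List (Int × String) := Primes.foldl (fun acc x =>
      match vhLevelOf present x [5, 4, 3] with
      | some p => acc ++ [p]
      | none => acc) []
  -- resolve each base to its maximal recorded level
  let base_max : PySem.Dict String Int := occ.foldl (fun d p =>
      if d.getD p.2 0 < p.1 then d.insert p.2 p.1 else d) PySem.Dict.empty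
  -- every base occurring in occ is a key of base_max, so Python's base_max[b] never raises; getD is exact here
  let vanham : List (Int × List String) := ([5, 4, 3] : List Int).map (fun val =>
      (val, PySem.List.sorted ((occ.filter (fun p => p.1 == val && base_max.getD p.2 0 == val)).map (fun p => p.2)) (fun s => s) false))
  let names : PySem.Set String :=
    PySem.Set.ofList (base_max.items.flatMap (fun p => (VAN_HAM_EXTENSIONS.getD p.2 []).map (fun y => p.1 ++ y)))
  vanham ++ [(2, PySem.List.sorted (Primes.filter (fun x => !(PySem.Set.contains names x))) (fun s => s) false)]

-- ===== PRECONDITION & SPEC =====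
def Spec_find_vanham_variables (Primes : List String) (out : List (Int × List String)) : Prop := out = find_vanham_variables_alt Primes
instance (Primes : List String) (out : List (Int × List String)) : Decidable (Spec_find_vanham_variables Primes out) := by unfold Spec_find_vanham_variables; infer_instance

-- ===== CLAIM (what is proved, stated in full; the proofs are below) =====
def Claim_equal_find_vanham_variables : Prop := ∀ (Primes : List String), Dom_find_vanham_variables Primes → Spec_find_vanham_variables Primes (find_vanham_variables Primes)

-- ===== LEMMAS AND PROOFS =====

-- proof-side abbreviations
def vhQ (P : List String) (v : Int) (b : String) : Bool :=
  (VAN_HAM_EXTENSIONS.getD v []).all (fun y => P.contains (b ++ y))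

def vhPost (val : Int) : String := (PySem.List.pyGet? (VAN_HAM_EXTENSIONS.getD val []) 0).getD ""

def vhCand (P : List String) (val : Int) : List String :=
  (P.filter (fun x => PySem.Str.endswith x (vhPost val))).map (fun x => PySem.Str.replace x (vhPost val) "")

-- A's three base lists and its seen_names
def vhB5 (P : List String) : List String :=
  ((vhCand P 5).filter (fun x => !(([] : List String).contains x))).filter (vhQ P 5)
def vhB4 (P : List String) : List String :=
  ((vhCand P 4).filter (fun x => !((vhB5 P).contains x))).filter (vhQ P 4)
def vhB3 (P : List String) : List String :=
  ((vhCand P 3).filter (fun x => !(((vhB5 P) ++ (vhB4 P)).contains x))).filter (vhQ P 3)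
def vhN (P : List String) : List String :=
  ((vhB5 P).flatMap (fun b => (VAN_HAM_EXTENSIONS.getD 5 []).map (fun y => b ++ y))
   ++ (vhB4 P).flatMap (fun b => (VAN_HAM_EXTENSIONS.getD 4 []).map (fun y => b ++ y)))
   ++ (vhB3 P).flatMap (fun b => (VAN_HAM_EXTENSIONS.getD 3 []).map (fun y => b ++ y))

theorem A_eq (P : List String) : find_vanham_variables P =
    [(5, PySem.List.sorted (vhB5 P) (fun s => s) false),
     (4, PySem.List.sorted (vhB4 P) (fun s => s) false),
     (3, PySem.List.sorted (vhB3 P) (fun s => s) false),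
     (2, PySem.List.sorted (P.filter (fun x => !((vhN P).contains x))) (fun s => s) false)] := rfl

-- B's classification with the set membership replaced by list membership, and the recursion unrolled
def vhM (Q : List String) (x : String) : Option (Int × String) :=
  if PySem.Str.endswith x "_medium" then
    (if vhQ Q 3 (PySem.Str.replace x "_medium" "") then some (3, PySem.Str.replace x "_medium" "") else none)
  else none

def vhLv (Q : List String) (x : String) : Option (Int × String) :=
  if PySem.Str.endswith x "_level1" then
    (if vhQ Q 5 (PySem.Str.replace x "_level1" "") then some (5, PySem.Str.replace x "_level1" "")
     else if vhQ Q 4 (PySem.Str.replace x "_level1" "") then some (4, PySem.Str.replace x "_level1" "")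
     else vhM Q x)
  else vhM Q x

def vhOcc (Q P : List String) : List (Int × String) := P.flatMap (fun x => (vhLv Q x).toList)

def vhMax (occ : List (Int × String)) : PySem.Dict String Int :=
  occ.foldl (fun d p => if d.getD p.2 0 < p.1 then d.insert p.2 p.1 else d) PySem.Dict.empty

theorem setContains_ofList (P : List String) (s : String) :
    PySem.Set.contains (PySem.Set.ofList P) s = P.contains s := by
  by_cases h : s ∈ P <;>
    simp [PySem.Set.contains_eq_listContains, PySem.Set.mem_ofList, h, List.contains_eq_mem]

theorem vhLevelOf_eq (Q x) : vhLevelOf (PySem.Set.ofList Q) x [5, 4, 3] = vhLv Q x := by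
  have hp5 : (PySem.List.pyGet? (VAN_HAM_EXTENSIONS.getD (5 : Int) []) 0).getD "" = "_level1" := rfl
  have hp4 : (PySem.List.pyGet? (VAN_HAM_EXTENSIONS.getD (4 : Int) []) 0).getD "" = "_level1" := rfl
  have hp3 : (PySem.List.pyGet? (VAN_HAM_EXTENSIONS.getD (3 : Int) []) 0).getD "" = "_medium" := rfl
  have hq : ∀ (v : Int) (b : String),
      ((VAN_HAM_EXTENSIONS.getD v []).all (fun y => PySem.Set.contains (PySem.Set.ofList Q) (b ++ y))) = vhQ Q v b := by
    intro v b
    unfold vhQ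
    congr 1
    funext y
    exact setContains_ofList Q (b ++ y)
  simp only [vhLevelOf, hp5, hp4, hp3, hq, vhLv, vhM]
  split_ifs <;> simp_all

theorem occ_foldl (f : String → Option (Int × String)) :
    ∀ (P : List String) (acc : List (Int × String)),
    P.foldl (fun acc x => match f x with | some p => acc ++ [p] | none => acc) acc
      = acc ++ P.flatMap (fun x => (f x).toList) := by
  intro P
  induction P with
  | nil => simp
  | cons a P ih =>
    intro acc
    simp only [List.foldl_cons, List.flatMap_cons]
    cases h : f a <;> simp [ih]

def vhAfter (P : List String) (occ : List (Int × String)) : List (Int × List String) :=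
  let base_max := vhMax occ
  (([5, 4, 3] : List Int).map (fun val =>
      (val, PySem.List.sorted ((occ.filter (fun p => p.1 == val && base_max.getD p.2 0 == val)).map (fun p => p.2)) (fun s => s) false)))
  ++ [(2, PySem.List.sorted (P.filter (fun x => !(PySem.Set.contains
        (PySem.Set.ofList (base_max.items.flatMap (fun p => (VAN_HAM_EXTENSIONS.getD p.2 []).map (fun y => p.1 ++ y)))) x)))
      (fun s => s) false)]

theorem B_eq (P : List String) : find_vanham_variables_alt P =
    [(5, PySem.List.sorted (((vhOcc P P).filter (fun p => p.1 == 5 && (vhMax (vhOcc P P)).getD p.2 0 == 5)).map (fun p => p.2)) (fun s => s) false),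
     (4, PySem.List.sorted (((vhOcc P P).filter (fun p => p.1 == 4 && (vhMax (vhOcc P P)).getD p.2 0 == 4)).map (fun p => p.2)) (fun s => s) false),
     (3, PySem.List.sorted (((vhOcc P P).filter (fun p => p.1 == 3 && (vhMax (vhOcc P P)).getD p.2 0 == 3)).map (fun p => p.2)) (fun s => s) false),
     (2, PySem.List.sorted (P.filter (fun x => !(PySem.Set.contains
           (PySem.Set.ofList ((vhMax (vhOcc P P)).items.flatMap (fun p => (VAN_HAM_EXTENSIONS.getD p.2 []).map (fun y => p.1 ++ y)))) x)))
         (fun s => s) false)] := by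
  have h0 : find_vanham_variables_alt P = vhAfter P
      (P.foldl (fun acc x => match vhLevelOf (PySem.Set.ofList P) x [5, 4, 3] with
        | some p => acc ++ [p] | none => acc) []) := rfl
  have h1 : (P.foldl (fun acc x => match vhLevelOf (PySem.Set.ofList P) x [5, 4, 3] with
      | some p => acc ++ [p] | none => acc) []) = vhOcc P P := by
    rw [occ_foldl]
    unfold vhOcc
    exact (List.nil_append _).trans (List.flatMap_congr (by intro x _; rw [vhLevelOf_eq]))
  rw [h0, h1]
  rfl


-- max-fold characterisation of base_max ------------------------------------

theorem vhMax_getD_fold : ∀ (occ : List (Int × String)) (d : PySem.Dict String Int) (b : String),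
    (occ.foldl (fun d p => if d.getD p.2 0 < p.1 then d.insert p.2 p.1 else d) d).getD b 0
      = occ.foldl (fun m p => if p.2 = b then max m p.1 else m) (d.getD b 0) := by
  intro occ
  induction occ with
  | nil => intro d b; rfl
  | cons p occ ih =>
    intro d b
    simp only [List.foldl_cons]
    by_cases hd : d.getD p.2 0 < p.1
    · rw [if_pos hd, ih]
      congr 1
      rw [PySem.Dict.getD_insert]
      by_cases hb : b = p.2
      · subst hb; simp; omega
      · simp [hb, Ne.symm hb]
    · rw [if_neg hd, ih]
      congr 1
      by_cases hb : p.2 = b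
      · subst hb; simp; omega
      · simp [hb]

theorem vhMax_isSome_fold : ∀ (occ : List (Int × String)), (∀ q ∈ occ, 0 < q.1) →
    ∀ (d : PySem.Dict String Int) (b : String),
    ((occ.foldl (fun d p => if d.getD p.2 0 < p.1 then d.insert p.2 p.1 else d) d).get? b).isSome
      = (occ.any (fun p => p.2 == b) || (d.get? b).isSome) := by
  intro occ
  induction occ with
  | nil => intro _ d b; simp
  | cons p occ ih =>
    intro hpos d b
    have hpos' : ∀ q ∈ occ, 0 < q.1 := fun q hq => hpos q (List.mem_cons_of_mem _ hq)
    simp only [List.foldl_cons, List.any_cons]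
    by_cases hd : d.getD p.2 0 < p.1
    · rw [if_pos hd, ih hpos']
      by_cases hb : p.2 = b
      · subst hb
        simp [PySem.Dict.get?_insert_self]
      · have hb' : b ≠ p.2 := fun h => hb h.symm
        have hbb : (p.2 == b) = false := beq_eq_false_iff_ne.mpr hb
        simp [PySem.Dict.get?_insert, hb', hbb]
    · rw [if_neg hd, ih hpos']
      by_cases hb : p.2 = b
      · subst hb
        have hsome : (d.get? p.2).isSome = true := by
          rw [PySem.Dict.getD_eq_get?_getD] at hd
          cases h : d.get? p.2 with
          | none =>
            rw [h] at hd
            exact absurd (hpos p List.mem_cons_self) (by simpa using hd)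
          | some v => simp
        simp [hsome]
      · have hbb : (p.2 == b) = false := beq_eq_false_iff_ne.mpr hb
        simp [hbb]

theorem foldmax_ge : ∀ (occ : List (Int × String)) (m0 : Int) (b : String),
    m0 ≤ occ.foldl (fun m p => if p.2 = b then max m p.1 else m) m0 := by
  intro occ
  induction occ with
  | nil => intro m0 b; simp
  | cons p occ ih =>
    intro m0 b
    simp only [List.foldl_cons]
    by_cases hb : p.2 = b
    · rw [if_pos hb]
      exact le_trans (le_max_left _ _) (ih _ b)
    · rw [if_neg hb]; exact ih _ b

theorem foldmax_mem : ∀ (occ : List (Int × String)) (m0 : Int) (b : String),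
    occ.foldl (fun m p => if p.2 = b then max m p.1 else m) m0 = m0 ∨
      (occ.foldl (fun m p => if p.2 = b then max m p.1 else m) m0, b) ∈ occ := by
  intro occ
  induction occ with
  | nil => intro m0 b; left; rfl
  | cons p occ ih =>
    intro m0 b
    simp only [List.foldl_cons]
    by_cases hb : p.2 = b
    · rw [if_pos hb]
      rcases ih (max m0 p.1) b with h | h
      · rw [h]
        rcases max_choice m0 p.1 with hm | hm
        · left; exact hm
        · right; rw [hm, ← hb]; exact List.mem_cons_self
      · right; exact List.mem_cons_of_mem _ h
    · rw [if_neg hb]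
      rcases ih m0 b with h | h
      · left; exact h
      · right; exact List.mem_cons_of_mem _ h

theorem foldmax_ub : ∀ (occ : List (Int × String)) (m0 : Int) (b : String) (v : Int),
    (v, b) ∈ occ → v ≤ occ.foldl (fun m p => if p.2 = b then max m p.1 else m) m0 := by
  intro occ
  induction occ with
  | nil => intro m0 b v h; simp at h
  | cons p occ ih =>
    intro m0 b v h
    simp only [List.foldl_cons]
    rcases List.mem_cons.mp h with h | h
    · have hb : p.2 = b := by rw [← h]
      have hv : p.1 = v := by rw [← h]
      rw [if_pos hb, ← hv]
      exact le_trans (le_max_right _ _) (foldmax_ge occ _ b)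
    · by_cases hb : p.2 = b
      · rw [if_pos hb]; exact ih _ b v h
      · rw [if_neg hb]; exact ih _ b v h


-- occ membership and vhLv case analysis -------------------------------------

theorem mem_vhOcc (Q P : List String) (v : Int) (b : String) :
    (v, b) ∈ vhOcc Q P ↔ ∃ x ∈ P, vhLv Q x = some (v, b) := by
  simp [vhOcc, List.mem_flatMap]

theorem not_e1_e3 (x : String) :
    PySem.Str.endswith x "_level1" = true → PySem.Str.endswith x "_medium" = true → False := by
  intro h1 h3
  rw [PySem.Str.endswith_eq, PySem.Chars.endswith_iff] at h1 h3
  rcases h1 with ⟨t1, ht1⟩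
  rcases h3 with ⟨t3, ht3⟩
  have : ("_level1".toList).getLast? = ("_medium".toList).getLast? := by
    have e1 : (t1 ++ "_level1".toList).getLast? = ("_level1".toList).getLast? := by
      simp [List.getLast?_append]
    have e3 : (t3 ++ "_medium".toList).getLast? = ("_medium".toList).getLast? := by
      simp [List.getLast?_append]
    rw [← e1, ← e3, ht1, ht3]
  simp at this

theorem vhLv_some5 (Q : List String) (x : String) (b : String) :
    vhLv Q x = some (5, b) ↔
      PySem.Str.endswith x "_level1" = true ∧ b = PySem.Str.replace x "_level1" "" ∧
        vhQ Q 5 (PySem.Str.replace x "_level1" "") = true := by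
  unfold vhLv vhM
  split_ifs <;> simp_all <;>
    first
      | exact eq_comm
      | (intro hm _; exact (not_e1_e3 x (by simp_all) (by simp_all)).elim)

theorem vhLv_some4 (Q : List String) (x : String) (b : String) :
    vhLv Q x = some (4, b) ↔
      PySem.Str.endswith x "_level1" = true ∧ b = PySem.Str.replace x "_level1" "" ∧
        vhQ Q 5 (PySem.Str.replace x "_level1" "") = false ∧
        vhQ Q 4 (PySem.Str.replace x "_level1" "") = true := by
  unfold vhLv vhM
  split_ifs <;> simp_all <;>
    first
      | exact eq_comm
      | (intro hm _; exact (not_e1_e3 x (by simp_all) (by simp_all)).elim)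

theorem vhOcc_levels (Q P : List String) (v : Int) (b : String) :
    (v, b) ∈ vhOcc Q P → v = 5 ∨ v = 4 ∨ v = 3 := by
  rw [mem_vhOcc]
  rintro ⟨x, _, hx⟩
  unfold vhLv vhM at hx
  split_ifs at hx <;> simp_all

theorem occ5_q5 (Q P : List String) (b : String) (h : (5, b) ∈ vhOcc Q P) : vhQ Q 5 b = true := by
  rw [mem_vhOcc] at h
  rcases h with ⟨x, _, hx⟩
  rw [vhLv_some5] at hx
  rw [hx.2.1]
  exact hx.2.2

theorem occ4_not_q5 (Q P : List String) (b : String) (h : (4, b) ∈ vhOcc Q P) : vhQ Q 5 b = false := by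
  rw [mem_vhOcc] at h
  rcases h with ⟨x, _, hx⟩
  rw [vhLv_some4] at hx
  rw [hx.2.1]
  exact hx.2.2.1

theorem vhOcc_pos (Q P : List String) : ∀ q ∈ vhOcc Q P, (0 : Int) < q.1 := by
  intro q hq
  rcases q with ⟨v, b⟩
  rcases vhOcc_levels Q P v b hq with h | h | h <;> omega

-- getD / get? of base_max on occ entries -------------------------------------

theorem vhMax_getD (Q P : List String) (b : String) :
    (vhMax (vhOcc Q P)).getD b 0
      = (vhOcc Q P).foldl (fun m p => if p.2 = b then max m p.1 else m) 0 := by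
  unfold vhMax
  rw [vhMax_getD_fold]
  rfl

theorem vhMax_getD5 (Q P : List String) (b : String) (h : (5, b) ∈ vhOcc Q P) :
    (vhMax (vhOcc Q P)).getD b 0 = 5 := by
  rw [vhMax_getD]
  have hub := foldmax_ub (vhOcc Q P) 0 b 5 h
  rcases foldmax_mem (vhOcc Q P) 0 b with hm | hm
  · omega
  · rcases vhOcc_levels Q P _ b hm with h' | h' | h' <;> omega

theorem vhMax_getD4 (Q P : List String) (b : String) (h : (4, b) ∈ vhOcc Q P) :
    (vhMax (vhOcc Q P)).getD b 0 = 4 := by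
  rw [vhMax_getD]
  have hub := foldmax_ub (vhOcc Q P) 0 b 4 h
  rcases foldmax_mem (vhOcc Q P) 0 b with hm | hm
  · omega
  · rcases vhOcc_levels Q P _ b hm with h' | h' | h'
    · exfalso
      rw [h'] at hm
      have := occ5_q5 Q P b hm
      have := occ4_not_q5 Q P b h
      simp_all
    · omega
    · omega

theorem vhMax_getD3_iff (Q P : List String) (b : String) (h : (3, b) ∈ vhOcc Q P) :
    ((vhMax (vhOcc Q P)).getD b 0 = 3) ↔ ¬ (4, b) ∈ vhOcc Q P ∧ ¬ (5, b) ∈ vhOcc Q P := by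
  constructor
  · intro hg
    constructor
    · intro h4; rw [vhMax_getD4 Q P b h4] at hg; omega
    · intro h5; rw [vhMax_getD5 Q P b h5] at hg; omega
  · rintro ⟨h4, h5⟩
    rw [vhMax_getD]
    have hub := foldmax_ub (vhOcc Q P) 0 b 3 h
    rcases foldmax_mem (vhOcc Q P) 0 b with hm | hm
    · omega
    · rcases vhOcc_levels Q P _ b hm with h' | h' | h' <;> rw [h'] at hm
      · exact absurd hm h5
      · exact absurd hm h4
      · omega

theorem vhMax_isSome (Q P : List String) (b : String) :
    ((vhMax (vhOcc Q P)).get? b).isSome = (vhOcc Q P).any (fun p => p.2 == b) := by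
  unfold vhMax
  rw [vhMax_isSome_fold _ (vhOcc_pos Q P)]
  simp

theorem vhMax_get?_eq (Q P : List String) (b : String) (hb : ∃ v, (v, b) ∈ vhOcc Q P) :
    (vhMax (vhOcc Q P)).get? b = some ((vhMax (vhOcc Q P)).getD b 0) := by
  have hany : (vhOcc Q P).any (fun p => p.2 == b) = true := by
    rcases hb with ⟨v, hv⟩
    exact List.any_eq_true.mpr ⟨(v, b), hv, by simp⟩
  have := vhMax_isSome Q P b
  rw [hany] at this
  cases h : (vhMax (vhOcc Q P)).get? b with
  | none => rw [h] at this; simp at this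
  | some w =>
    rw [PySem.Dict.getD_eq_get?_getD, h]
    rfl

theorem vhMax_get?_none (Q P : List String) (b : String) (hb : ∀ v, ¬ (v, b) ∈ vhOcc Q P) :
    (vhMax (vhOcc Q P)).get? b = none := by
  have hany : (vhOcc Q P).any (fun p => p.2 == b) = false := by
    rw [List.any_eq_false]
    rintro ⟨v, c⟩ hm hc
    simp only [beq_iff_eq] at hc
    exact hb v (by rwa [hc] at hm)
  have := vhMax_isSome Q P b
  rw [hany] at this
  cases h : (vhMax (vhOcc Q P)).get? b with
  | none => rfl
  | some w => rw [h] at this; simp at this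


-- per-prime contribution to each level bucket --------------------------------

theorem elt5 (Q : List String) (x : String) :
    (((vhLv Q x).toList.filter (fun p => p.1 == (5 : Int))).map (fun p => p.2))
      = if (PySem.Str.endswith x "_level1" && vhQ Q 5 (PySem.Str.replace x "_level1" "")) = true
        then [PySem.Str.replace x "_level1" ""] else [] := by
  unfold vhLv vhM
  split_ifs <;> simp_all

theorem elt4 (Q : List String) (x : String) :
    (((vhLv Q x).toList.filter (fun p => p.1 == (4 : Int))).map (fun p => p.2))
      = if (PySem.Str.endswith x "_level1" && (!vhQ Q 5 (PySem.Str.replace x "_level1" "") && vhQ Q 4 (PySem.Str.replace x "_level1" ""))) = true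
        then [PySem.Str.replace x "_level1" ""] else [] := by
  unfold vhLv vhM
  split_ifs <;> simp_all

theorem elt3 (Q : List String) (x : String) :
    (((vhLv Q x).toList.filter (fun p => p.1 == (3 : Int))).map (fun p => p.2))
      = if (PySem.Str.endswith x "_medium" && vhQ Q 3 (PySem.Str.replace x "_medium" "")) = true
        then [PySem.Str.replace x "_medium" ""] else [] := by
  unfold vhLv vhM
  split_ifs <;> simp_all <;>
    exact not_e1_e3 x (by simp_all) (by simp_all)

-- the three bucket lists, occurrence-major = candidate-major ------------------

theorem L5 (Q : List String) : ∀ (P : List String),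
    ((vhOcc Q P).filter (fun p => p.1 == (5 : Int))).map (fun p => p.2)
      = ((P.filter (fun x => PySem.Str.endswith x "_level1")).map (fun x => PySem.Str.replace x "_level1" "")).filter (vhQ Q 5) := by
  intro P
  induction P with
  | nil => rfl
  | cons a P ih =>
    simp only [vhOcc, List.flatMap_cons] at *
    rw [List.filter_append, List.map_append, elt5, ih]
    by_cases h1 : PySem.Str.endswith a "_level1" = true <;>
      by_cases h2 : vhQ Q 5 (PySem.Str.replace a "_level1" "") = true <;>
        simp [List.filter_cons, h1, h2, -PySem.Str.endswith_eq]

theorem L4 (Q : List String) : ∀ (P : List String),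
    ((vhOcc Q P).filter (fun p => p.1 == (4 : Int))).map (fun p => p.2)
      = ((P.filter (fun x => PySem.Str.endswith x "_level1")).map (fun x => PySem.Str.replace x "_level1" "")).filter (fun b => !vhQ Q 5 b && vhQ Q 4 b) := by
  intro P
  induction P with
  | nil => rfl
  | cons a P ih =>
    simp only [vhOcc, List.flatMap_cons] at *
    rw [List.filter_append, List.map_append, elt4, ih]
    by_cases h1 : PySem.Str.endswith a "_level1" = true <;>
      by_cases h2 : vhQ Q 5 (PySem.Str.replace a "_level1" "") = true <;>
        by_cases h3 : vhQ Q 4 (PySem.Str.replace a "_level1" "") = true <;>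
          simp [List.filter_cons, h1, h2, h3, -PySem.Str.endswith_eq]

theorem L3 (Q : List String) : ∀ (P : List String),
    ((vhOcc Q P).filter (fun p => p.1 == (3 : Int))).map (fun p => p.2)
      = ((P.filter (fun x => PySem.Str.endswith x "_medium")).map (fun x => PySem.Str.replace x "_medium" "")).filter (vhQ Q 3) := by
  intro P
  induction P with
  | nil => rfl
  | cons a P ih =>
    simp only [vhOcc, List.flatMap_cons] at *
    rw [List.filter_append, List.map_append, elt3, ih]
    by_cases h1 : PySem.Str.endswith a "_medium" = true <;>
      by_cases h2 : vhQ Q 3 (PySem.Str.replace a "_medium" "") = true <;>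
        simp [List.filter_cons, h1, h2, -PySem.Str.endswith_eq]

-- A's base lists in candidate-major form -------------------------------------

theorem cand5_eq (P : List String) : vhCand P 5
    = (P.filter (fun x => PySem.Str.endswith x "_level1")).map (fun x => PySem.Str.replace x "_level1" "") := rfl
theorem cand4_eq (P : List String) : vhCand P 4
    = (P.filter (fun x => PySem.Str.endswith x "_level1")).map (fun x => PySem.Str.replace x "_level1" "") := rfl
theorem cand3_eq (P : List String) : vhCand P 3
    = (P.filter (fun x => PySem.Str.endswith x "_medium")).map (fun x => PySem.Str.replace x "_medium" "") := rfl

theorem vhB5_eq (P : List String) : vhB5 P = (vhCand P 5).filter (vhQ P 5) := by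
  unfold vhB5
  congr 1
  simp

theorem B5_occ (P : List String) :
    vhB5 P = ((vhOcc P P).filter (fun p => p.1 == (5 : Int))).map (fun p => p.2) := by
  rw [vhB5_eq, cand5_eq, L5]

theorem memB5 (P : List String) (b : String) : b ∈ vhB5 P ↔ (5, b) ∈ vhOcc P P := by
  rw [B5_occ]
  simp only [List.mem_map, List.mem_filter, beq_iff_eq]
  constructor
  · rintro ⟨⟨v, c⟩, ⟨hm, h5⟩, hb⟩
    simp only at h5 hb
    subst h5; subst hb
    exact hm
  · intro h
    exact ⟨(5, b), ⟨h, rfl⟩, rfl⟩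

theorem vhB4_eq (P : List String) :
    vhB4 P = (vhCand P 4).filter (fun b => !vhQ P 5 b && vhQ P 4 b) := by
  unfold vhB4
  rw [List.filter_filter]
  apply List.filter_congr
  intro b hb
  have hmem : b ∈ vhB5 P ↔ vhQ P 5 b = true := by
    rw [vhB5_eq, List.mem_filter]
    have : b ∈ vhCand P 5 := hb
    simp [this]
  by_cases h5 : vhQ P 5 b = true <;>
    simp [List.contains_eq_mem, hmem, h5]

theorem B4_occ (P : List String) :
    vhB4 P = ((vhOcc P P).filter (fun p => p.1 == (4 : Int))).map (fun p => p.2) := by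
  rw [vhB4_eq, cand4_eq, L4]

theorem memB4 (P : List String) (b : String) : b ∈ vhB4 P ↔ (4, b) ∈ vhOcc P P := by
  rw [B4_occ]
  simp only [List.mem_map, List.mem_filter, beq_iff_eq]
  constructor
  · rintro ⟨⟨v, c⟩, ⟨hm, h4⟩, hb⟩
    simp only at h4 hb
    subst h4; subst hb
    exact hm
  · intro h
    exact ⟨(4, b), ⟨h, rfl⟩, rfl⟩

theorem vhB3_eq (P : List String) :
    vhB3 P = ((vhCand P 3).filter (vhQ P 3)).filter (fun b => !(vhB5 P).contains b && !(vhB4 P).contains b) := by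
  unfold vhB3
  rw [List.filter_filter, List.filter_filter]
  apply List.filter_congr
  intro b _
  by_cases h5 : b ∈ vhB5 P <;> by_cases h4 : b ∈ vhB4 P <;>
    by_cases h3 : vhQ P 3 b = true <;>
      simp [List.contains_eq_mem, List.mem_append, h5, h4, h3]

theorem B3_occ (P : List String) :
    vhB3 P = (((vhOcc P P).filter (fun p => p.1 == (3 : Int))).map (fun p => p.2)).filter
        (fun b => !(vhB5 P).contains b && !(vhB4 P).contains b) := by
  rw [vhB3_eq, cand3_eq, L3]

theorem memB3 (P : List String) (b : String) :
    b ∈ vhB3 P ↔ (3, b) ∈ vhOcc P P ∧ ¬ (4, b) ∈ vhOcc P P ∧ ¬ (5, b) ∈ vhOcc P P := by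
  rw [B3_occ]
  simp only [List.mem_filter, List.mem_map, beq_iff_eq, Bool.and_eq_true, Bool.not_eq_eq_eq_not,
    Bool.not_true, List.contains_eq_mem, decide_eq_false_iff_not, memB5, memB4]
  constructor
  · rintro ⟨⟨⟨v, c⟩, ⟨hm, h3⟩, hb⟩, hn5, hn4⟩
    simp only at h3 hb
    subst h3; subst hb
    exact ⟨hm, hn4, hn5⟩
  · rintro ⟨hm, hn4, hn5⟩
    exact ⟨⟨(3, b), ⟨hm, rfl⟩, rfl⟩, hn5, hn4⟩


-- B's filters with the base_max condition resolved ---------------------------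

theorem E5 (P : List String) :
    ((vhOcc P P).filter (fun p => p.1 == (5 : Int) && (vhMax (vhOcc P P)).getD p.2 0 == 5)).map (fun p => p.2)
      = vhB5 P := by
  rw [B5_occ]
  congr 1
  apply List.filter_congr
  intro p hp
  by_cases h5 : p.1 = 5
  · have hp5 : (5, p.2) ∈ vhOcc P P := by
      rw [← h5]
      simpa using hp
    simp [h5, vhMax_getD5 P P p.2 hp5]
  · simp [h5]

theorem E4 (P : List String) :
    ((vhOcc P P).filter (fun p => p.1 == (4 : Int) && (vhMax (vhOcc P P)).getD p.2 0 == 4)).map (fun p => p.2)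
      = vhB4 P := by
  rw [B4_occ]
  congr 1
  apply List.filter_congr
  intro p hp
  by_cases h4 : p.1 = 4
  · have hp4 : (4, p.2) ∈ vhOcc P P := by
      rw [← h4]
      simpa using hp
    simp [h4, vhMax_getD4 P P p.2 hp4]
  · simp [h4]

theorem E3 (P : List String) :
    ((vhOcc P P).filter (fun p => p.1 == (3 : Int) && (vhMax (vhOcc P P)).getD p.2 0 == 3)).map (fun p => p.2)
      = vhB3 P := by
  rw [B3_occ, List.filter_map, List.filter_filter]
  congr 1
  apply List.filter_congr
  intro p hp
  by_cases h3 : p.1 = 3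
  · have hp3 : (3, p.2) ∈ vhOcc P P := by
      rw [← h3]
      simpa using hp
    have hiff := vhMax_getD3_iff P P p.2 hp3
    by_cases hg : (vhMax (vhOcc P P)).getD p.2 0 = 3
    · rcases hiff.mp hg with ⟨hn4, hn5⟩
      simp [h3, hg, List.contains_eq_mem, memB5, memB4, hn4, hn5]
    · have : ¬ (¬ (4, p.2) ∈ vhOcc P P ∧ ¬ (5, p.2) ∈ vhOcc P P) := fun h => hg (hiff.mpr h)
      rcases Decidable.not_and_iff_not_or_not.mp this with h | h
      · have h4 : (4, p.2) ∈ vhOcc P P := Decidable.not_not.mp h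
        simp [h3, hg, List.contains_eq_mem, memB4, h4]
      · have h5 : (5, p.2) ∈ vhOcc P P := Decidable.not_not.mp h
        simp [h3, hg, List.contains_eq_mem, memB5, h5]
  · have hb3 : (p.1 == (3 : Int)) = false := beq_eq_false_iff_ne.mpr h3
    simp [hb3]

-- get? characterisation of base_max ------------------------------------------

theorem condinsert_nodup : ∀ (occ : List (Int × String)) (d : PySem.Dict String Int),
    d.keys.Nodup → (occ.foldl (fun d p => if d.getD p.2 0 < p.1 then d.insert p.2 p.1 else d) d).keys.Nodup := by
  intro occ
  induction occ with
  | nil => intro d h; exact h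
  | cons p occ ih =>
    intro d h
    simp only [List.foldl_cons]
    by_cases hd : d.getD p.2 0 < p.1
    · rw [if_pos hd]
      exact ih _ (PySem.Dict.nodup_keys_insert _ _ _ h)
    · rw [if_neg hd]
      exact ih _ h

theorem vhMax_nodup (occ : List (Int × String)) : (vhMax occ).keys.Nodup :=
  condinsert_nodup occ PySem.Dict.empty PySem.Dict.nodup_keys_empty

theorem get?5 (P : List String) (b : String) :
    (vhMax (vhOcc P P)).get? b = some 5 ↔ (5, b) ∈ vhOcc P P := by
  constructor
  · intro h
    have hb : ∃ v, (v, b) ∈ vhOcc P P := by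
      by_contra hn
      push_neg at hn
      rw [vhMax_get?_none P P b hn] at h
      simp at h
    have hg : (vhMax (vhOcc P P)).getD b 0 = 5 := by
      rw [PySem.Dict.getD_eq_get?_getD, h]; rfl
    rw [vhMax_getD] at hg
    rcases foldmax_mem (vhOcc P P) 0 b with hm | hm
    · omega
    · rwa [hg] at hm
  · intro h
    rw [vhMax_get?_eq P P b ⟨5, h⟩, vhMax_getD5 P P b h]

theorem get?4 (P : List String) (b : String) :
    (vhMax (vhOcc P P)).get? b = some 4 ↔ (4, b) ∈ vhOcc P P := by
  constructor
  · intro h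
    have hb : ∃ v, (v, b) ∈ vhOcc P P := by
      by_contra hn
      push_neg at hn
      rw [vhMax_get?_none P P b hn] at h
      simp at h
    have hg : (vhMax (vhOcc P P)).getD b 0 = 4 := by
      rw [PySem.Dict.getD_eq_get?_getD, h]; rfl
    rw [vhMax_getD] at hg
    rcases foldmax_mem (vhOcc P P) 0 b with hm | hm
    · omega
    · rwa [hg] at hm
  · intro h
    rw [vhMax_get?_eq P P b ⟨4, h⟩, vhMax_getD4 P P b h]

theorem get?3 (P : List String) (b : String) :
    (vhMax (vhOcc P P)).get? b = some 3 ↔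
      (3, b) ∈ vhOcc P P ∧ ¬ (4, b) ∈ vhOcc P P ∧ ¬ (5, b) ∈ vhOcc P P := by
  constructor
  · intro h
    have hb : ∃ v, (v, b) ∈ vhOcc P P := by
      by_contra hn
      push_neg at hn
      rw [vhMax_get?_none P P b hn] at h
      simp at h
    have hg : (vhMax (vhOcc P P)).getD b 0 = 3 := by
      rw [PySem.Dict.getD_eq_get?_getD, h]; rfl
    have h3 : (3, b) ∈ vhOcc P P := by
      rw [vhMax_getD] at hg
      rcases foldmax_mem (vhOcc P P) 0 b with hm | hm
      · omega
      · rwa [hg] at hm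
    exact ⟨h3, (vhMax_getD3_iff P P b h3).mp hg⟩
  · rintro ⟨h3, hn⟩
    rw [vhMax_get?_eq P P b ⟨3, h3⟩, (vhMax_getD3_iff P P b h3).mpr hn]

theorem get?_vals (P : List String) (b : String) (v : Int)
    (h : (vhMax (vhOcc P P)).get? b = some v) : v = 5 ∨ v = 4 ∨ v = 3 := by
  have hb : ∃ w, (w, b) ∈ vhOcc P P := by
    by_contra hn
    push_neg at hn
    rw [vhMax_get?_none P P b hn] at h
    simp at h
  have hg : (vhMax (vhOcc P P)).getD b 0 = v := by
    rw [PySem.Dict.getD_eq_get?_getD, h]; rfl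
  rcases hb with ⟨w, hw⟩
  have hwl := vhOcc_levels P P w b hw
  have hub := foldmax_ub (vhOcc P P) 0 b w hw
  rw [vhMax_getD] at hg
  rcases foldmax_mem (vhOcc P P) 0 b with hm | hm
  · omega
  · rw [hg] at hm
    exact vhOcc_levels P P v b hm

-- names: B's set from base_max.items equals A's seen_names --------------------

theorem names_eq (P : List String) (x : String) :
    PySem.Set.contains (PySem.Set.ofList ((vhMax (vhOcc P P)).items.flatMap
        (fun p => (VAN_HAM_EXTENSIONS.getD p.2 []).map (fun y => p.1 ++ y)))) x
      = (vhN P).contains x := by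
  have hiff : x ∈ (vhMax (vhOcc P P)).items.flatMap
      (fun p => (VAN_HAM_EXTENSIONS.getD p.2 []).map (fun y => p.1 ++ y)) ↔ x ∈ vhN P := by
    simp only [vhN, List.mem_flatMap, List.mem_map, List.mem_append]
    constructor
    · rintro ⟨⟨b, v⟩, hp, y, hy, rfl⟩
      have hg : (vhMax (vhOcc P P)).get? b = some v :=
        (PySem.Dict.get?_eq_some_iff_mem_items _ _ _ (vhMax_nodup _)).2 hp
      rcases get?_vals P b v hg with rfl | rfl | rfl
      · exact Or.inl (Or.inl ⟨b, (memB5 P b).2 ((get?5 P b).1 hg), y, hy, rfl⟩)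
      · exact Or.inl (Or.inr ⟨b, (memB4 P b).2 ((get?4 P b).1 hg), y, hy, rfl⟩)
      · exact Or.inr ⟨b, (memB3 P b).2 ((get?3 P b).1 hg), y, hy, rfl⟩
    · rintro ((⟨b, hb, y, hy, rfl⟩ | ⟨b, hb, y, hy, rfl⟩) | ⟨b, hb, y, hy, rfl⟩)
      · exact ⟨(b, 5), (PySem.Dict.get?_eq_some_iff_mem_items _ _ _ (vhMax_nodup _)).1
          ((get?5 P b).2 ((memB5 P b).1 hb)), y, hy, rfl⟩
      · exact ⟨(b, 4), (PySem.Dict.get?_eq_some_iff_mem_items _ _ _ (vhMax_nodup _)).1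
          ((get?4 P b).2 ((memB4 P b).1 hb)), y, hy, rfl⟩
      · exact ⟨(b, 3), (PySem.Dict.get?_eq_some_iff_mem_items _ _ _ (vhMax_nodup _)).1
          ((get?3 P b).2 ((memB3 P b).1 hb)), y, hy, rfl⟩
  by_cases h : x ∈ vhN P <;>
    simp [setContains_ofList, List.contains_eq_mem, hiff, h]

theorem main_eq (P : List String) : find_vanham_variables P = find_vanham_variables_alt P := by
  rw [A_eq, B_eq, E5, E4, E3,
    show P.filter (fun x => !(PySem.Set.contains (PySem.Set.ofList ((vhMax (vhOcc P P)).items.flatMap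
          (fun p => (VAN_HAM_EXTENSIONS.getD p.2 []).map (fun y => p.1 ++ y)))) x))
        = P.filter (fun x => !((vhN P).contains x)) from
      List.filter_congr fun x _ => by rw [names_eq]]

-- ===== VERDICT (by name: the statement is the Claim_ definition above) =====
theorem find_vanham_variables_spec : Claim_equal_find_vanham_variables := by
  intro Primes _
  exact main_eq Primes
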